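-- pv_equiv track=rewrite | github.com/EdmonMartirosyan/Python | homework2_6.py | f
-- ===== SOURCE A (Python) =====
-- def f(a):
--     b = []
--     c = []
--     for i in range(len(a)):
--         if a[i] != -1:
--             b.append(a[i])
--         else:
--             c.append(i)
--     b.sort()
--     for j in range(len(c)):
--         b.insert(c[j], -1)
--     return b
-- ===== SOURCE B (Python) =====
-- def f(a):
--     it = iter(sorted(x for x in a if x != -1))
--     return [-1 if x == -1 else next(it) for x in a]
-- ===== Notes on version B (the rewrite author's own statement) =====
-- stated objective: idiomatic
-- what changed: Instead of recording the positions of the -1s and re-inserting -1 into the sorted list with repeated list.insert, B sorts the non -1 values once and rebuilds the result in a single pass over the original list, consuming the sorted values as a stream; no position list and no insert calls.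
import Mathlib
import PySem

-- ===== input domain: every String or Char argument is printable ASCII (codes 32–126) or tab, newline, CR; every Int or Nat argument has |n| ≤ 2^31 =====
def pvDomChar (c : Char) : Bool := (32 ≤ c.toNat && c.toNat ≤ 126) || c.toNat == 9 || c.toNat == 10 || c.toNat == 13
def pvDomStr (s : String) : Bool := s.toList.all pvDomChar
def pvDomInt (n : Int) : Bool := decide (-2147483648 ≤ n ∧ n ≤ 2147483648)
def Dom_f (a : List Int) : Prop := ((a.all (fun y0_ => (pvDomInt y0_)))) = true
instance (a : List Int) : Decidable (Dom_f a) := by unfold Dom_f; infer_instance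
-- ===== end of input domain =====

-- B rebuilds the list in one pass over the input, consuming the sorted non -1
-- values as a stream, instead of A's position list plus repeated list.insert.

-- ===== PORT A =====
def f (a : List Int) : List Int :=
  -- first loop: split into non -1 values (b) and positions of -1 (c)
  let bc := (PySem.List.pyRange 0 a.length 1).foldl
    (fun (bc : List Int × List Int) i =>
      if PySem.List.pyGetD a i 0 ≠ -1 then (bc.1 ++ [PySem.List.pyGetD a i 0], bc.2)
      else (bc.1, bc.2 ++ [i])) ([], [])
  -- b.sort()
  let b := PySem.List.sorted bc.1 (fun x => x) false
  -- second loop: re-insert -1 at the recorded positions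
  (PySem.List.pyRange 0 bc.2.length 1).foldl
    (fun b j => PySem.List.insert b (PySem.List.pyGetD bc.2 j 0) (-1)) b

-- ===== PORT B =====
-- the iterator over the sorted values: head = next(it), tail = rest of the stream
-- (the stream is never exhausted when next is called, so headD's default is unreachable)
def fAltGo : List Int → List Int → List Int
  | [], _ => []
  | x :: xs, vs =>
    if x = -1 then -1 :: fAltGo xs vs
    else vs.headD 0 :: fAltGo xs vs.tail

def f_alt (a : List Int) : List Int :=
  fAltGo a (PySem.List.sorted (a.filter (fun x => x ≠ -1)) (fun x => x) false)

-- ===== PRECONDITION & SPEC =====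
def Spec_f (a : List Int) (out : List Int) : Prop := out = f_alt a
instance (a : List Int) (out : List Int) : Decidable (Spec_f a out) := by unfold Spec_f; infer_instance

-- ===== CLAIM (what is proved, stated in full; the proofs are below) =====
def Claim_equal_f : Prop := ∀ (a : List Int), Dom_f a → Spec_f a (f a)

-- ===== LEMMAS AND PROOFS =====

-- positions (as Ints, offset by s) of the -1 entries of a list
def negIdx : List Int → Int → List Int
  | [], _ => []
  | x :: xs, s => if x = -1 then s :: negIdx xs (s + 1) else negIdx xs (s + 1)

-- characterisation of A's first loop
lemma loop1 (rest : List Int) : ∀ (pre b c A : List Int), A = pre ++ rest →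
    (PySem.List.pyRange (pre.length) (A.length) 1).foldl
      (fun (bc : List Int × List Int) i =>
        if PySem.List.pyGetD A i 0 ≠ -1 then (bc.1 ++ [PySem.List.pyGetD A i 0], bc.2)
        else (bc.1, bc.2 ++ [i])) (b, c)
    = (b ++ rest.filter (fun x => x ≠ -1), c ++ negIdx rest (pre.length)) := by
  induction rest with
  | nil =>
    intro pre b c A hA
    subst hA
    rw [PySem.List.pyRange_one_eq_nil (by simp)]
    simp [negIdx]
  | cons x xs ih =>
    intro pre b c A hA
    subst hA
    have hlt : (pre.length : Int) < ((pre ++ x :: xs).length : Int) := by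
      simp
    rw [PySem.List.pyRange_one_cons hlt, List.foldl_cons]
    have hget : PySem.List.pyGetD (pre ++ x :: xs) (pre.length : Int) 0 = x := by
      rw [PySem.List.pyGetD_natCast]
      simp [List.getD]
    rw [hget]
    have hlen1 : ((pre.length : Int)) + 1 = (((pre ++ [x]).length : Nat) : Int) := by
      simp
    by_cases hx : x = -1
    · rw [if_neg (not_not_intro hx), hlen1,
        ih (pre ++ [x]) b (c ++ [(pre.length : Int)]) _ (by simp)]
      subst hx
      simp [negIdx]
    · rw [if_pos hx, hlen1, ih (pre ++ [x]) (b ++ [x]) c _ (by simp)]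
      simp [negIdx, hx]

-- the insert loop over the -1 positions rebuilds exactly what B's single pass builds
lemma insert_rebuild (a : List Int) : ∀ (vs pre : List Int),
    vs.length = (a.filter (fun x => x ≠ -1)).length →
    (negIdx a (pre.length)).foldl (fun b i => PySem.List.insert b i (-1)) (pre ++ vs)
    = pre ++ fAltGo a vs := by
  induction a with
  | nil =>
    intro vs pre hlen
    have : vs = [] := by
      simpa using List.length_eq_zero_iff.mp (by simpa using hlen)
    simp [this, negIdx, fAltGo]
  | cons x xs ih =>
    intro vs pre hlen
    by_cases hx : x = -1
    · subst hx
      have hni : negIdx (-1 :: xs) (pre.length : Int)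
          = (pre.length : Int) :: negIdx xs ((pre.length : Int) + 1) := by
        simp [negIdx]
      rw [hni, List.foldl_cons]
      have hins : PySem.List.insert (pre ++ vs) (pre.length : Int) (-1)
          = (pre ++ [-1]) ++ vs := by
        rw [PySem.List.insert_natCast _ _ _ (by simp)]
        simp
      have hlen1 : ((pre.length : Int)) + 1 = (((pre ++ [-1]).length : Nat) : Int) := by
        simp
      rw [hins, hlen1, ih vs (pre ++ [-1]) (by simpa using hlen)]
      simp [fAltGo]
    · have hne : vs ≠ [] := by
        intro h
        rw [h] at hlen
        simp [hx] at hlen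
      obtain ⟨v, vs', rfl⟩ := List.exists_cons_of_ne_nil hne
      have hni : negIdx (x :: xs) (pre.length : Int)
          = negIdx xs ((pre.length : Int) + 1) := by
        simp [negIdx, hx]
      have hpre : pre ++ v :: vs' = (pre ++ [v]) ++ vs' := by simp
      have hlen1 : ((pre.length : Int)) + 1 = (((pre ++ [v]).length : Nat) : Int) := by
        simp
      rw [hni, hpre, hlen1, ih vs' (pre ++ [v]) (by
        have h2 : (v :: vs').length = ((x :: xs).filter (fun x => x ≠ -1)).length := hlen
        simp [hx] at h2
        simpa using h2)]
      simp [fAltGo, hx]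

-- ===== VERDICT (by name: the statement is the Claim_ definition above) =====
theorem f_spec : Claim_equal_f := by
  intro a _
  show f a = f_alt a
  have h1 := loop1 a [] [] [] a (by simp)
  simp only [List.length_nil, Nat.cast_zero, List.nil_append] at h1
  simp only [f, h1]
  rw [PySem.List.foldl_pyRange_zero_pyGetD' (negIdx a 0) 0
    (fun b i => PySem.List.insert b i (-1))]
  have h2 := insert_rebuild a
    (PySem.List.sorted (a.filter (fun x => x ≠ -1)) (fun x => x) false) []
    (by simp [PySem.List.length_sorted])
  simp only [List.length_nil, Nat.cast_zero, List.nil_append] at h2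
  simpa [f_alt] using h2
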